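-- pv_equiv track=rewrite | github.com/anmolgautam151/Closed_Domain_Question_Answering_System | preproces.py | generate_target
-- ===== SOURCE A (Python) =====
-- def generate_target(sentences, start_char_idx):
--     target = 1
--     tar = 0
--     for i in sentences:
--         tar = tar + len(i)
--         if (tar < start_char_idx):
--             target += 1
--     return target
-- ===== SOURCE B (Python) =====
-- import bisect
-- from itertools import accumulate
--
--
-- def generate_target(sentences, start_char_idx):
--     prefixes = list(accumulate(len(s) for s in sentences))
--     return 1 + bisect.bisect_left(prefixes, start_char_idx)
-- ===== Notes on version B (the rewrite author's own statement) =====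
-- stated objective: alternative
-- what changed: Replaces the running-sum loop with a counter by prefix sums built via itertools.accumulate plus a binary search (bisect_left) that locates the end of the strictly-below-threshold run, valid because lengths are nonnegative so the prefixes are nondecreasing.
import Mathlib
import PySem

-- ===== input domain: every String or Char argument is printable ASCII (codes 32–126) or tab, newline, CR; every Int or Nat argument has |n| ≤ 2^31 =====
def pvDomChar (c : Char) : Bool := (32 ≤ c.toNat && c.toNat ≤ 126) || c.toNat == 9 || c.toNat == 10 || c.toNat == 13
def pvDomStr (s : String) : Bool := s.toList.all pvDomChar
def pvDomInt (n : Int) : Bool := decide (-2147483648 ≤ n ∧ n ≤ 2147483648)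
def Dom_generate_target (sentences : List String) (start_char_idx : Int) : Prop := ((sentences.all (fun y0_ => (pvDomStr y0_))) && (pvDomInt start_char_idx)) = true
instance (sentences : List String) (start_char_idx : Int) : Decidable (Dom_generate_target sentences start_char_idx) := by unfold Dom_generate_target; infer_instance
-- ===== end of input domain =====

-- B replaces A's running-sum-with-counter loop by prefix sums (accumulate) plus a
-- binary search (bisect_left) for the end of the strictly-below-threshold run (alternative decomposition).

-- ===== PORT A =====
def generate_target (sentences : List String) (start_char_idx : Int) : Int :=
  (sentences.foldl
    (fun (st : Int × Int) i =>
      let tar := st.2 + PySem.Str.len i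
      (if tar < start_char_idx then st.1 + 1 else st.1, tar))
    (1, 0)).1

-- ===== PORT B =====
-- list(accumulate(len(s) for s in sentences)): running prefix sums of the lengths
def pvAccum : List Int → Int → List Int
  | [], _ => []
  | l :: ls, acc => (acc + l) :: pvAccum ls (acc + l)

def generate_target_alt (sentences : List String) (start_char_idx : Int) : Int :=
  let prefixes := pvAccum (sentences.map PySem.Str.len) 0
  1 + (PySem.List.bisectLeft prefixes start_char_idx : Int)

-- ===== PRECONDITION & SPEC =====
def Spec_generate_target (sentences : List String) (start_char_idx : Int) (out : Int) : Prop := out = generate_target_alt sentences start_char_idx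
instance (sentences : List String) (start_char_idx : Int) (out : Int) : Decidable (Spec_generate_target sentences start_char_idx out) := by unfold Spec_generate_target; infer_instance

-- ===== CLAIM (what is proved, stated in full; the proofs are below) =====
def Claim_equal_generate_target : Prop := ∀ (sentences : List String) (start_char_idx : Int), Dom_generate_target sentences start_char_idx → Spec_generate_target sentences start_char_idx (generate_target sentences start_char_idx)

-- ===== LEMMAS AND PROOFS =====

-- A's loop computes 1 + (number of prefix sums strictly below the threshold).
theorem pv_foldl_char (k : Int) :
    ∀ (xs : List String) (t acc : Int),
      (xs.foldl
        (fun (st : Int × Int) i =>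
          let tar := st.2 + PySem.Str.len i
          (if tar < k then st.1 + 1 else st.1, tar)) (t, acc)).1
      = t + ((pvAccum (xs.map PySem.Str.len) acc).countP (fun y => decide (y < k)) : Int) := by
  intro xs
  induction xs with
  | nil => intro t acc; simp [pvAccum]
  | cons x xs ih =>
    intro t acc
    simp only [List.foldl_cons, List.map_cons, pvAccum, List.countP_cons]
    rw [ih]
    by_cases h : acc + (x.length : Int) < k <;> simp [PySem.Str.len_eq, h] <;> push_cast <;> ring

-- every prefix sum of a nonnegative list starting at acc is ≥ acc
theorem pv_accum_lb (ls : List Int) (h : ∀ l ∈ ls, 0 ≤ l) :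
    ∀ (acc : Int) (y : Int), y ∈ pvAccum ls acc → acc ≤ y := by
  induction ls with
  | nil => intro acc y hy; simp [pvAccum] at hy
  | cons l ls ih =>
    intro acc y hy
    have hl : 0 ≤ l := h l (by simp)
    simp only [pvAccum, List.mem_cons] at hy
    rcases hy with rfl | hy
    · omega
    · have := ih (fun a ha => h a (by simp [ha])) (acc + l) y hy
      omega

-- prefix sums of a nonnegative list are nondecreasing
theorem pv_accum_pairwise (ls : List Int) (h : ∀ l ∈ ls, 0 ≤ l) :
    ∀ acc : Int, (pvAccum ls acc).Pairwise (· ≤ ·) := by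
  induction ls with
  | nil => intro acc; simp [pvAccum]
  | cons l ls ih =>
    intro acc
    have htail : ∀ a ∈ ls, (0:Int) ≤ a := fun a ha => h a (by simp [ha])
    refine List.Pairwise.cons ?_ (ih htail (acc + l))
    intro y hy
    have := pv_accum_lb ls htail (acc + l) y hy
    omega

-- a list whose elements below x are exactly those at indices < r has countP (· < x) = r
theorem pv_countP_of_cut (x : Int) :
    ∀ (a : List Int) (r : Nat), r ≤ a.length →
      (∀ (j : Nat) (hj : j < a.length), (a[j] < x ↔ j < r)) →
      a.countP (fun y => decide (y < x)) = r := by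
  intro a
  induction a with
  | nil => intro r hr _; simpa using (Nat.le_zero.mp hr).symm
  | cons y a ih =>
    intro r hr hc
    rw [List.countP_cons]
    cases r with
    | zero =>
      have h0 : ¬ y < x := by
        have := hc 0 (by simp)
        simpa using this
      have : a.countP (fun y => decide (y < x)) = 0 := by
        refine ih 0 (Nat.zero_le _) ?_
        intro j hj
        have := hc (j + 1) (by simpa using Nat.succ_lt_succ hj)
        simpa using this
      simp [h0, this]
    | succ r' =>
      have h0 : y < x := by
        have := hc 0 (by simp)
        simpa using this
      have hrec : a.countP (fun y => decide (y < x)) = r' := by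
        refine ih r' (by simpa using Nat.succ_le_succ_iff.mp hr) ?_
        intro j hj
        have := hc (j + 1) (by simpa using Nat.succ_lt_succ hj)
        simp only [List.getElem_cons_succ] at this
        omega
      simp [hrec, decide_eq_true h0]

-- ===== VERDICT (by name: the statement is the Claim_ definition above) =====
theorem generate_target_spec : Claim_equal_generate_target := by
  intro sentences k _
  unfold Spec_generate_target generate_target generate_target_alt
  set a := pvAccum (sentences.map PySem.Str.len) 0 with ha
  have hnn : ∀ l ∈ sentences.map PySem.Str.len, (0:Int) ≤ l := by
    intro l hl
    rcases List.mem_map.mp hl with ⟨s, _, rfl⟩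
    rw [PySem.Str.len_eq]
    positivity
  have hpw : a.Pairwise (· ≤ ·) := pv_accum_pairwise _ hnn 0
  obtain ⟨hle, hlt, hge⟩ := PySem.List.bisectLeft_spec a k hpw
  have hcut : ∀ (j : Nat) (hj : j < a.length), (a[j] < k ↔ j < PySem.List.bisectLeft a k) := by
    intro j hj
    constructor
    · intro h
      by_contra hnot
      exact absurd (hge j hj (Nat.le_of_not_lt hnot)) (by omega)
    · exact hlt j hj
  have hcount := pv_countP_of_cut k a (PySem.List.bisectLeft a k) hle hcut
  rw [pv_foldl_char k sentences 1 0, ← ha, hcount]
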